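-- pv_equiv track=rewrite | github.com/judithvdw/AOC2025 | 06.py | parse_spaces
-- ===== SOURCE A (Python) =====
-- def parse_spaces(rows):
--     cuts = set()
--     for i, char in enumerate(rows[-1][1:]):  # loop over the operators, except the first to find the cuts
--         if char != ' ':
--             cuts.add(i)
--
--     split_rows = []
--     for row in rows[:-1]:  # don't need to do this for the operators
--         cur_row = []
--         buffer = ''
--         for i, char in enumerate(row):
--             if i in cuts:
--                 cur_row.append(buffer)
--                 buffer = ''
--             else:
--                 buffer += char
--         cur_row.append(buffer)
--         split_rows.append(cur_row)
--     return split_rows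
-- ===== SOURCE B (Python) =====
-- def parse_spaces(rows):
--     last = rows[-1]
--     cuts = sorted({i for i, ch in enumerate(last[1:]) if ch != ' '})
--     out = []
--     for row in rows[:-1]:
--         segs = []
--         prev = 0
--         for c in cuts:
--             if c < len(row):
--                 segs.append(row[prev:c])
--                 prev = c + 1
--         segs.append(row[prev:])
--         out.append(segs)
--     return out
-- ===== Notes on version B (the rewrite author's own statement) =====
-- stated objective: alternative
-- what changed: Phase two replaced: instead of scanning every character into a growing buffer and flushing at cut positions, B sorts the cut set once and emits each segment directly as a slice between consecutive cut boundaries (prev..c), skipping cuts beyond the row length.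
-- outside the precondition, e.g. on parse_spaces([]): A raises IndexError, B raises IndexError
import Mathlib
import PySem

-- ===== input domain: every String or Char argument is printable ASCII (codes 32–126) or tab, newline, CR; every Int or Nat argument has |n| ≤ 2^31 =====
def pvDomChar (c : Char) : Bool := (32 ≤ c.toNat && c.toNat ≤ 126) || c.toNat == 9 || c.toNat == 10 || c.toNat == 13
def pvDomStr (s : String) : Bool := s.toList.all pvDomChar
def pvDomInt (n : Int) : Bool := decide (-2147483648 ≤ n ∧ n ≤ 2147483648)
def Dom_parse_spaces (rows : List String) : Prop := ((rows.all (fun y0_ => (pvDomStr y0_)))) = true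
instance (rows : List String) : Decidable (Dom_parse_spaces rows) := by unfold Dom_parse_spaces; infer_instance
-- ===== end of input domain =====

-- B splits rows by slicing between sorted cut boundaries instead of A's per-character buffer scan; equal return values on all non-empty inputs.

-- ===== PORT A =====
def parse_spaces (rows : List String) : List (List String) :=
  match PySem.List.pyGet? rows (-1) with
  | none => []  -- unreachable under Pre_ (rows ≠ []): Python raises IndexError
  | some last =>
    let cuts : PySem.Set Int :=
      (PySem.List.enumerate (PySem.List.slice last.toList (some 1) none) 0).foldl
        (fun s p => if p.2 ≠ ' ' then PySem.Set.add s p.1 else s) PySem.Set.empty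
    (PySem.List.slice rows none (some (-1))).foldl
      (fun split_rows row =>
        let st := (PySem.List.enumerate row.toList 0).foldl
          (fun (st : List String × List Char) p =>
            if p.1 ∈ cuts then (st.1 ++ [String.ofList st.2], ([] : List Char))
            else (st.1, st.2 ++ [p.2])) ([], [])
        split_rows ++ [st.1 ++ [String.ofList st.2]]) []

-- ===== PORT B =====
def parse_spaces_alt (rows : List String) : List (List String) :=
  match PySem.List.pyGet? rows (-1) with
  | none => []  -- unreachable under Pre_ (rows ≠ []): Python raises IndexError
  | some last =>
    let cuts : List Int :=
      PySem.List.sorted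
        (PySem.Set.ofList
          (((PySem.List.enumerate (PySem.List.slice last.toList (some 1) none) 0).filter
              (fun p => p.2 ≠ ' ')).map (·.1)))
        (fun x => x) false
    (PySem.List.slice rows none (some (-1))).map (fun row =>
      let st := cuts.foldl
        (fun (st : List String × Int) c =>
          if c < (row.toList.length : Int) then
            (st.1 ++ [String.ofList (PySem.List.slice row.toList (some st.2) (some c))], c + 1)
          else st) ([], 0)
      st.1 ++ [String.ofList (PySem.List.slice row.toList (some st.2) none)])

-- ===== PRECONDITION & SPEC =====
-- Pre_ excludes only rows = [], where Python A raises IndexError on rows[-1] (B raises too).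
def Pre_parse_spaces (rows : List String) : Prop := rows ≠ []
instance (rows : List String) : Decidable (Pre_parse_spaces rows) := by unfold Pre_parse_spaces; infer_instance
def pvWitness_parse_spaces : List String := ["ab c", "1 23", "+  *"]

def Spec_parse_spaces (rows : List String) (out : List (List String)) : Prop := out = parse_spaces_alt rows
instance (rows : List String) (out : List (List String)) : Decidable (Spec_parse_spaces rows out) := by unfold Spec_parse_spaces; infer_instance

-- ===== CLAIM (what is proved, stated in full; the proofs are below) =====
def Claim_equal_parse_spaces : Prop := ∀ (rows : List String), Dom_parse_spaces rows → Pre_parse_spaces rows → Spec_parse_spaces rows (parse_spaces rows)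

-- ===== LEMMAS AND PROOFS =====

-- A's conditional set-building fold is Set.ofList of the filtered index list.
theorem foldl_add_if_eq (l : List (Int × Char)) (s : PySem.Set Int) :
    l.foldl (fun s p => if p.2 ≠ ' ' then PySem.Set.add s p.1 else s) s
      = ((l.filter (fun p => p.2 ≠ ' ')).map (·.1)).foldl PySem.Set.add s := by
  induction l generalizing s with
  | nil => rfl
  | cons x xs ih =>
    by_cases h : x.2 ≠ ' '
    · rw [List.foldl_cons, if_pos h, ih, List.filter_cons_of_pos (by simpa using h),
        List.map_cons, List.foldl_cons]
    · rw [List.foldl_cons, if_neg h, ih, List.filter_cons_of_neg (by simpa using h)]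

-- The character scan over a stretch containing no cut just extends the buffer.
theorem scan_no_hit (S : List Int) (m : List Char) (s : Int) (acc : List String) (buf : List Char)
    (h : ∀ k : Nat, k < m.length → (s + (k : Int)) ∉ S) :
    (PySem.List.enumerate m s).foldl
      (fun (st : List String × List Char) p =>
        if p.1 ∈ S then (st.1 ++ [String.ofList st.2], ([] : List Char))
        else (st.1, st.2 ++ [p.2])) (acc, buf) = (acc, buf ++ m) := by
  induction m generalizing s buf with
  | nil => simp
  | cons c cs ih =>
    have h0 : s ∉ S := by simpa using h 0 (by simp)
    rw [PySem.List.enumerate_cons]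
    simp only [List.foldl_cons, if_neg h0]
    rw [ih (s + 1) (buf ++ [c]) (fun k hk => by
      have := h (k + 1) (by simpa using Nat.succ_lt_succ hk)
      push_cast at this ⊢
      convert this using 2
      ring)]
    simp

-- B's boundary fold skips every cut at or beyond the row length.
theorem foldB_skip (l : List Char) (cs : List Int) (st : List String × Int)
    (h : ∀ c ∈ cs, ¬ c < (l.length : Int)) :
    cs.foldl
      (fun (st : List String × Int) c =>
        if c < (l.length : Int) then
          (st.1 ++ [String.ofList (PySem.List.slice l (some st.2) (some c))], c + 1)
        else st) st = st := by
  induction cs generalizing st with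
  | nil => rfl
  | cons c cs ih =>
    simp only [List.foldl_cons, if_neg (h c (by simp))]
    exact ih st (fun x hx => h x (by simp [hx]))

-- Main per-row equivalence: A's buffer scan from position p equals B's slicing fold,
-- given cs is the strictly increasing list of the cuts ≥ p.
theorem scan_eq_slices (cs : List Int) (S : List Int) (l : List Char) (p : Nat) (acc : List String)
    (hpw : cs.Pairwise (· < ·))
    (hge : ∀ c ∈ cs, (p : Int) ≤ c)
    (hmem : ∀ i : Int, (p : Int) ≤ i → (i ∈ S ↔ i ∈ cs)) :
    (let st := (PySem.List.enumerate (l.drop p) (p : Int)).foldl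
        (fun (st : List String × List Char) q =>
          if q.1 ∈ S then (st.1 ++ [String.ofList st.2], ([] : List Char))
          else (st.1, st.2 ++ [q.2])) (acc, []);
      st.1 ++ [String.ofList st.2])
    = (let st := cs.foldl
        (fun (st : List String × Int) c =>
          if c < (l.length : Int) then
            (st.1 ++ [String.ofList (PySem.List.slice l (some st.2) (some c))], c + 1)
          else st) (acc, (p : Int));
      st.1 ++ [String.ofList (PySem.List.slice l (some st.2) none)]) := by
  induction cs generalizing p acc with
  | nil =>
    simp only [List.foldl_nil]
    rw [scan_no_hit S (l.drop p) (p : Int) acc []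
        (fun k hk => by
          intro hin
          have := (hmem ((p : Int) + k) (by omega)).1 hin
          simp at this)]
    simp [PySem.List.slice_from_natCast]
  | cons c rest ih =>
    rw [List.pairwise_cons] at hpw
    obtain ⟨hclt, hpwr⟩ := hpw
    have hc0 : (p : Int) ≤ c := hge c (by simp)
    by_cases hlen : c < (l.length : Int)
    · -- cut inside the row
      set q := c.toNat with hq
      have hcq : (q : Int) = c := Int.toNat_of_nonneg (by omega)
      have hpq : p ≤ q := by omega
      have hql : q < l.length := by omega
      -- split the suffix at the cut position
      have hsplit : l.drop p = (l.drop p).take (q - p) ++ (l[q] :: l.drop (q + 1)) := by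
        conv_lhs => rw [← List.take_append_drop (q - p) (l.drop p)]
        congr 1
        rw [List.drop_drop]
        have hqp : p + (q - p) = q := by omega
        rw [hqp, List.drop_eq_getElem_cons hql]
      conv_lhs => rw [hsplit]
      rw [PySem.List.enumerate_append, List.foldl_append]
      have htlen : ((l.drop p).take (q - p)).length = q - p := by
        simp; omega
      rw [scan_no_hit S ((l.drop p).take (q - p)) (p : Int) acc []
          (fun k hk => by
            rw [htlen] at hk
            intro hin
            have hic := (hmem ((p : Int) + k) (by omega)).1 hin
            rcases List.mem_cons.1 hic with h | h
            · omega
            · have := hclt _ h; omega)]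
      rw [htlen]
      have hstart : (p : Int) + ((q : Int) - (p : Int)) = c := by omega
      have hcub : ((q - p : Nat) : Int) = (q : Int) - (p : Int) := by omega
      rw [hcub, hstart, PySem.List.enumerate_cons]
      simp only [List.foldl_cons]
      have hcS : c ∈ S := (hmem c hc0).2 (by simp)
      rw [if_pos hcS]
      have hnext : c + 1 = ((q + 1 : Nat) : Int) := by omega
      have lhs_eq := ih (q + 1) (acc ++ [String.ofList ([] ++ (l.drop p).take (q - p))])
        hpwr
        (fun x hx => by have := hclt x hx; omega)
        (fun i hi => by
          rw [hmem i (by omega)]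
          simp only [List.mem_cons]
          constructor
          · rintro (rfl | h)
            · omega
            · exact h
          · intro h; right; exact h)
      rw [hnext, lhs_eq]
      -- now reduce B's first step
      simp only [if_pos hlen]
      have hslice : PySem.List.slice l (some ((p : Nat) : Int)) (some c)
          = (l.drop p).take (q - p) := by
        rw [PySem.List.slice_toNat l (by omega) (by omega)]
        congr 1
      rw [hslice]
      simp
    · -- cut (and all later cuts) beyond the row: scan never fires, B skips all
      rw [scan_no_hit S (l.drop p) (p : Int) acc []
          (fun k hk => by
            intro hin
            have hic := (hmem ((p : Int) + k) (by omega)).1 hin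
            have hlk : (p : Int) + k < (l.length : Int) := by
              simp at hk; omega
            rcases List.mem_cons.1 hic with h | h
            · omega
            · have := hclt _ h; omega)]
      rw [foldB_skip l (c :: rest) (acc, (p : Int))
          (fun x hx => by
            rcases List.mem_cons.1 hx with h | h
            · subst h; exact hlen
            · have := hclt _ h; intro hc; omega)]
      simp [PySem.List.slice_from_natCast]

-- ===== VERDICT (by name: the statement is the Claim_ definition above) =====
theorem parse_spaces_spec : Claim_equal_parse_spaces := by
  intro rows _ hpre
  unfold Spec_parse_spaces parse_spaces parse_spaces_alt
  obtain ⟨last, hlast⟩ : ∃ last, rows.getLast? = some last := by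
    cases h : rows.getLast? with
    | none => exact absurd (List.getLast?_eq_none_iff.mp h) hpre
    | some x => exact ⟨x, rfl⟩
  rw [PySem.List.pyGet?_neg_one, hlast]
  simp only []
  -- identify the two cut structures
  rw [foldl_add_if_eq]
  set X := (((PySem.List.enumerate (PySem.List.slice last.toList (some 1) none) 0).filter
      (fun p => p.2 ≠ ' ')).map (·.1)) with hX
  have hS : PySem.Set.ofList X = X.foldl PySem.Set.add PySem.Set.empty := by
    rw [PySem.Set.ofList_eq_foldl]; rfl
  set S : List Int := PySem.Set.ofList X with hSdef
  rw [← hS]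
  set cs : List Int := PySem.List.sorted S (fun x => x) false with hcs
  have hpw : cs.Pairwise (· < ·) := PySem.List.sorted_ofList_pairwise_lt X
  have hmem : ∀ i : Int, i ∈ S ↔ i ∈ cs := fun i => (PySem.List.mem_sorted S (fun x => x) false i).symm
  have hge : ∀ c ∈ cs, (0 : Int) ≤ c := by
    intro c hc
    have hcS : c ∈ S := (hmem c).2 hc
    rw [hSdef, PySem.Set.mem_ofList, hX] at hcS
    simp only [List.mem_map, List.mem_filter] at hcS
    obtain ⟨p, ⟨hp, _⟩, rfl⟩ := hcS
    rw [PySem.List.mem_enumerate_iff] at hp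
    obtain ⟨k, _, rfl⟩ := hp
    simp
  rw [PySem.List.foldl_append_singleton_eq_map]
  simp only [List.nil_append]
  apply List.map_congr_left
  intro row _
  have := scan_eq_slices cs S row.toList 0 [] hpw
    (fun c hc => hge c hc)
    (fun i _ => hmem i)
  simpa using this
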